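-- pv_equiv track=rewrite | github.com/lingz/pyphone | pyphone/pyphone.py | strip_repeats
-- ===== SOURCE A (Python) =====
-- def strip_repeats(word):
--     stripped = []
--     last_letter = None
--     word = filter(None, word.split("$"))
--     for letter in word:
--         if letter != last_letter and not letter.startswith('_'):
--             stripped.append(letter)
--         last_letter = letter
--     return tuple(stripped)
-- ===== SOURCE B (Python) =====
-- def strip_repeats(word):
--     # run-based traversal: outer loop handles one run of equal tokens per
--     # iteration (emit its key unless underscore-prefixed), inner loop skips
--     # the rest of the run; no last_letter state is maintained.
--     toks = [t for t in word.split("$") if t]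
--     out = []
--     i, n = 0, len(toks)
--     while i < n:
--         head = toks[i]
--         if not head.startswith('_'):
--             out.append(head)
--         i += 1
--         while i < n and toks[i] == head:
--             i += 1
--     return tuple(out)
-- ===== Notes on version B (the rewrite author's own statement) =====
-- stated objective: alternative
-- what changed: A's single token-by-token pass maintaining a last_letter state variable is replaced by a run-based traversal: an outer loop that emits each run's key (unless underscore-prefixed) and an inner loop that skips the remaining equal tokens of the run, so no previous-token state is kept.
import Mathlib
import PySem

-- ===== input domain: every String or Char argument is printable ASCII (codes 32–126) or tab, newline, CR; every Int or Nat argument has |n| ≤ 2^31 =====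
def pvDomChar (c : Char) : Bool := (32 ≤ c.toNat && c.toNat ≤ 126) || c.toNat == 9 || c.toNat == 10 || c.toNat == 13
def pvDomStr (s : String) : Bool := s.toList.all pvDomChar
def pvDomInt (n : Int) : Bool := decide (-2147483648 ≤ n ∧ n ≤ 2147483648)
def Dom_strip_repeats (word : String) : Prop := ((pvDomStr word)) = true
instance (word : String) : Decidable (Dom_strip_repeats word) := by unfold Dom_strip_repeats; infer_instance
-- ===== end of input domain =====

-- B replaces A's single stateful token-by-token pass (last_letter variable) by a
-- run-based traversal: an outer recursion per run of equal tokens, with an inner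
-- skip of the rest of the run; no previous-token state is kept.

-- ===== PORT A =====
def strip_repeats (word : String) : List String :=
  let toks := ((PySem.Str.split? word "$").getD []).filter (fun t => t ≠ "")
  (toks.foldl (fun (st : List String × Option String) letter =>
      if some letter ≠ st.2 ∧ PySem.Str.startswith letter "_" = false
      then (st.1 ++ [letter], some letter) else (st.1, some letter))
    ([], none)).1

-- ===== PORT B =====
/-- the inner `while` loop of Source B: skip the remaining tokens of the current run -/
def pvSkip (head : String) : List String → List String
  | [] => []
  | x :: r => if x = head then pvSkip head r else x :: r

lemma pvSkip_len_le (head : String) : ∀ (l : List String), (pvSkip head l).length ≤ l.length := by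
  intro l
  induction l with
  | nil => simp [pvSkip]
  | cons x r ih =>
    simp only [pvSkip]
    split
    · exact Nat.le_succ_of_le ih
    · simp

/-- the outer `while` loop of Source B, one iteration per run -/
def pvRuns : List String → List String
  | [] => []
  | head :: r =>
    (if PySem.Str.startswith head "_" then [] else [head]) ++ pvRuns (pvSkip head r)
termination_by l => l.length
decreasing_by simpa using Nat.lt_succ_of_le (pvSkip_len_le head r)

def strip_repeats_alt (word : String) : List String :=
  let toks := ((PySem.Str.split? word "$").getD []).filter (fun t => t ≠ "")
  pvRuns toks

-- ===== PRECONDITION & SPEC =====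
def Spec_strip_repeats (word : String) (out : List String) : Prop := out = strip_repeats_alt word
instance (word : String) (out : List String) : Decidable (Spec_strip_repeats word out) := by unfold Spec_strip_repeats; infer_instance

-- ===== CLAIM (what is proved, stated in full; the proofs are below) =====
def Claim_equal_strip_repeats : Prop := ∀ (word : String), Dom_strip_repeats word → Spec_strip_repeats word (strip_repeats word)

-- ===== LEMMAS AND PROOFS =====

/-- the deduplicated (runs-collapsed) list, parametrised by the previous token -/
def pvRun (last : Option String) : List String → List String
  | [] => []
  | t :: r => (if some t ≠ last then [t] else []) ++ pvRun (some t) r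

lemma pvLoopA (toks : List String) : ∀ (acc : List String) (last : Option String),
    (toks.foldl (fun (st : List String × Option String) letter =>
      if some letter ≠ st.2 ∧ PySem.Str.startswith letter "_" = false
      then (st.1 ++ [letter], some letter) else (st.1, some letter))
      (acc, last)).1
    = acc ++ (pvRun last toks).filter (fun t => PySem.Str.startswith t "_" = false) := by
  induction toks with
  | nil => simp [pvRun]
  | cons t r ih =>
    intro acc last
    simp only [List.foldl_cons]
    by_cases h1 : some t = last
    · rw [if_neg (by simp [h1]), ih]
      subst h1
      simp [pvRun]
    · by_cases h2 : PySem.Str.startswith t "_" = false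
      · rw [if_pos ⟨by simp [h1], h2⟩, ih]
        have h2c : PySem.Chars.startswith t.toList ['_'] = false := by
          simpa using h2
        simp [pvRun, h1, h2c]
      · rw [if_neg (by tauto), ih]
        have h2c : PySem.Chars.startswith t.toList ['_'] = true := by
          simpa using (eq_true_of_ne_false h2)
        simp [pvRun, h1, h2c]

lemma pvRun_skip (t : String) : ∀ (r : List String),
    pvRun (some t) r = pvRun none (pvSkip t r) := by
  intro r
  induction r with
  | nil => simp [pvSkip, pvRun]
  | cons x r2 ih =>
    by_cases h : x = t
    · subst h; simpa [pvSkip, pvRun] using ih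
    · simp [pvSkip, pvRun, h]

lemma pvRuns_eq_filter_run : ∀ (toks : List String),
    pvRuns toks = (pvRun none toks).filter (fun t => PySem.Str.startswith t "_" = false) := by
  intro toks
  induction toks using pvRuns.induct with
  | case1 => simp [pvRuns, pvRun]
  | case2 head r ih =>
    rw [pvRuns, ih, ← pvRun_skip]
    by_cases h : PySem.Chars.startswith head.toList ['_'] = true
    · simp [pvRun, h]
    · simp [pvRun, h]

-- ===== VERDICT (by name: the statement is the Claim_ definition above) =====
theorem strip_repeats_spec : Claim_equal_strip_repeats := by
  intro word _
  show _ = _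
  unfold strip_repeats strip_repeats_alt
  rw [pvLoopA, pvRuns_eq_filter_run]
  simp
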